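-- pv_equiv track=rewrite | github.com/teismar/Advent-Of-Code-2023 | Day 5/partOne_Location.py | input_list_to_list_of_lists
-- ===== SOURCE A (Python) =====
-- def input_list_to_list_of_lists(input_list: list) -> list:
--     """
--     Split the list of lines into a list of lists.
--     :param input_list:
--     :return:
--     """
--     split_data = []
--     temp = []
--
--     for item in input_list:
--         if item == '':
--             split_data.append(temp)
--             temp = []
--         else:
--             temp.append(item)
--
--     if temp:
--         split_data.append(temp)
--
--     return split_data
-- ===== SOURCE B (Python) =====
-- def input_list_to_list_of_lists(input_list: list) -> list:
--     """Split the list of lines into sublists at blank lines (recursive split at first '')."""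
--     if '' in input_list:
--         i = input_list.index('')
--         return [input_list[:i]] + input_list_to_list_of_lists(input_list[i + 1:])
--     return [input_list] if input_list else []
-- ===== Notes on version B (the rewrite author's own statement) =====
-- stated objective: alternative
-- what changed: Replaced the single accumulator loop (temp buffer flushed on each blank, trailing non-empty guard) by a recursion that finds the first blank line and splits off the prefix slice, recursing on the rest.
import Mathlib
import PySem

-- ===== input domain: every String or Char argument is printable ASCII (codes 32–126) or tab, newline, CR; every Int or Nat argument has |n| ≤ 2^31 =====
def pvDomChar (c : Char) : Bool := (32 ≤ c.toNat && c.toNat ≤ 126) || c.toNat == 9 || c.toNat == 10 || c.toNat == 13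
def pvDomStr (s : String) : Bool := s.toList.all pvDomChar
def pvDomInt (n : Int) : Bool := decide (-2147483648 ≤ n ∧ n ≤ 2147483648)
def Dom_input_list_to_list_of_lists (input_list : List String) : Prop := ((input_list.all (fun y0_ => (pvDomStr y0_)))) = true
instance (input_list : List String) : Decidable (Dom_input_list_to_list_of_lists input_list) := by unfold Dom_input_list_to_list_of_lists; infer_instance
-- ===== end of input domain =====

-- B replaces A's accumulator loop by a recursion splitting at the first blank line; same O(n) cost, different decomposition.

-- ===== PORT A =====
-- A: one pass with accumulator (split_data, temp); '' flushes temp, trailing non-empty temp is appended.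
def input_list_to_list_of_lists (input_list : List String) : List (List String) :=
  let st := input_list.foldl
    (fun (st : List (List String) × List String) item =>
      if item = "" then (st.1 ++ [st.2], ([] : List String)) else (st.1, st.2 ++ [item]))
    (([] : List (List String)), ([] : List String))
  if st.2 ≠ [] then st.1 ++ [st.2] else st.1

-- ===== PORT B =====
-- B: `'' in l` + `l.index('')` ported as one match on PySem.List.index? (some ↔ membership,
-- value = first index); the slices l[:i] and l[i+1:] with this non-negative in-range index
-- are exactly List.take i / List.drop (i+1) (PySem.List.slice_to_natCast / slice_from_natCast).
def input_list_to_list_of_lists_alt (l : List String) : List (List String) :=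
  match h : PySem.List.index? l "" with
  | some i => l.take i :: input_list_to_list_of_lists_alt (l.drop (i + 1))
  | none => if l ≠ [] then [l] else []
termination_by l.length
decreasing_by
  have hmem : "" ∈ l := (PySem.List.index?_isSome_iff l "").mp (by rw [h]; rfl)
  have hlen : 0 < l.length := List.length_pos_of_mem hmem
  simp only [List.length_drop]
  omega

-- ===== PRECONDITION & SPEC =====
def Spec_input_list_to_list_of_lists (input_list : List String) (out : List (List String)) : Prop := out = input_list_to_list_of_lists_alt input_list
instance (input_list : List String) (out : List (List String)) : Decidable (Spec_input_list_to_list_of_lists input_list out) := by unfold Spec_input_list_to_list_of_lists; infer_instance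

-- ===== CLAIM (what is proved, stated in full; the proofs are below) =====
def Claim_equal_input_list_to_list_of_lists : Prop := ∀ (input_list : List String), Dom_input_list_to_list_of_lists input_list → Spec_input_list_to_list_of_lists input_list (input_list_to_list_of_lists input_list)

-- ===== LEMMAS AND PROOFS =====

-- A's loop body and finishing step, named for the proofs.
def pvStep (st : List (List String) × List String) (item : String) : List (List String) × List String :=
  if item = "" then (st.1 ++ [st.2], ([] : List String)) else (st.1, st.2 ++ [item])

def pvFinish (st : List (List String) × List String) : List (List String) :=
  if st.2 ≠ [] then st.1 ++ [st.2] else st.1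

-- A's loop, with the pending buffer `temp` made explicit.
def pvGAux (temp : List String) (l : List String) : List (List String) :=
  match l with
  | [] => if temp ≠ [] then [temp] else []
  | x :: xs => if x = "" then temp :: pvGAux [] xs else pvGAux (temp ++ [x]) xs

-- Merging a pending buffer into the head group of a split result.
def pvConsMerge (temp : List String) (gs : List (List String)) : List (List String) :=
  match gs with
  | [] => if temp ≠ [] then [temp] else []
  | g :: rest => (temp ++ g) :: rest

lemma pvConsMerge_nil (gs : List (List String)) : pvConsMerge [] gs = gs := by
  cases gs <;> simp [pvConsMerge]

lemma pvConsMerge_merge (t₁ t₂ : List String) (gs : List (List String)) :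
    pvConsMerge t₁ (pvConsMerge t₂ gs) = pvConsMerge (t₁ ++ t₂) gs := by
  cases gs with
  | nil =>
    by_cases h : t₂ = [] <;> simp [pvConsMerge, h]
  | cons g rest => simp [pvConsMerge]

lemma alt_of_index?_eq_some {l : List String} {i : Nat} (h : PySem.List.index? l "" = some i) :
    input_list_to_list_of_lists_alt l =
      l.take i :: input_list_to_list_of_lists_alt (l.drop (i + 1)) := by
  rw [input_list_to_list_of_lists_alt.eq_def]
  split
  · rename_i j hj; rw [h] at hj; cases hj; rfl
  · rename_i hn; rw [h] at hn; cases hn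

lemma alt_of_index?_eq_none {l : List String} (h : PySem.List.index? l "" = none) :
    input_list_to_list_of_lists_alt l = if l ≠ [] then [l] else [] := by
  rw [input_list_to_list_of_lists_alt.eq_def]
  split
  · rename_i j hj; rw [h] at hj; cases hj
  · rfl

lemma alt_nil : input_list_to_list_of_lists_alt [] = [] := by
  rw [alt_of_index?_eq_none (by simp)]
  simp

lemma alt_cons (x : String) (xs : List String) :
    input_list_to_list_of_lists_alt (x :: xs) =
      if x = "" then [] :: input_list_to_list_of_lists_alt xs
      else pvConsMerge [x] (input_list_to_list_of_lists_alt xs) := by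
  by_cases hx : x = ""
  · subst hx
    rw [if_pos rfl, alt_of_index?_eq_some (PySem.List.index?_cons_self _ _)]
    simp
  · rw [if_neg hx]
    cases hi : PySem.List.index? xs "" with
    | none =>
      have hc : PySem.List.index? (x :: xs) "" = none := by
        rw [PySem.List.index?_cons_of_ne xs hx, hi]; rfl
      rw [alt_of_index?_eq_none hc, alt_of_index?_eq_none hi]
      cases xs <;> simp [pvConsMerge]
    | some i =>
      have hc : PySem.List.index? (x :: xs) "" = some (i + 1) := by
        rw [PySem.List.index?_cons_of_ne xs hx, hi]; rfl
      rw [alt_of_index?_eq_some hc, alt_of_index?_eq_some hi]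
      simp [pvConsMerge]

lemma pvGAux_eq_consMerge_alt (l : List String) :
    ∀ temp, pvGAux temp l = pvConsMerge temp (input_list_to_list_of_lists_alt l) := by
  induction l with
  | nil => intro temp; simp [pvGAux, alt_nil, pvConsMerge]
  | cons x xs ih =>
    intro temp
    rw [alt_cons]
    by_cases hx : x = ""
    · subst hx
      simp only [pvGAux]
      rw [ih [], pvConsMerge_nil]
      simp [pvConsMerge]
    · simp only [pvGAux, if_neg hx]
      rw [ih (temp ++ [x]), pvConsMerge_merge]

lemma pvFold_eq_gAux (l : List String) :
    ∀ sd temp, pvFinish (l.foldl pvStep (sd, temp)) = sd ++ pvGAux temp l := by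
  induction l with
  | nil =>
    intro sd temp
    by_cases h : temp = [] <;> simp [pvFinish, pvGAux, h]
  | cons x xs ih =>
    intro sd temp
    by_cases hx : x = ""
    · subst hx
      rw [List.foldl_cons, show pvStep (sd, temp) "" = (sd ++ [temp], []) from by simp [pvStep]]
      rw [ih (sd ++ [temp]) []]
      simp [pvGAux]
    · rw [List.foldl_cons, show pvStep (sd, temp) x = (sd, temp ++ [x]) from by simp [pvStep, hx]]
      rw [ih sd (temp ++ [x])]
      simp [pvGAux, hx]

-- ===== VERDICT (by name: the statement is the Claim_ definition above) =====
theorem input_list_to_list_of_lists_spec : Claim_equal_input_list_to_list_of_lists := by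
  intro l _
  unfold Spec_input_list_to_list_of_lists input_list_to_list_of_lists
  show pvFinish (l.foldl pvStep ([], [])) = _
  rw [pvFold_eq_gAux l [] [], pvGAux_eq_consMerge_alt l [], pvConsMerge_nil]
  simp
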